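-- pv_equiv track=rewrite | github.com/OCitkowski/projects_training | exercise_mate/string.py | is_werewolf
-- ===== SOURCE A (Python) =====
-- def is_werewolf(target: str) -> bool:
--     target = target.translate({ord(i): None for i in '123,."[]?()!<>~@#$%^&*()_+=-1234567890;: '}).lower()
--     l_message = list(target.upper().replace(' ', ""))
--     result = ""
--
--     for i in range(len(l_message), 0, -1):
--         result += l_message[i - 1]
--
--     l_result = list(result)
--
--     return l_result == l_message
-- ===== SOURCE B (Python) =====
-- STRIP = set('123,."[]?()!<>~@#$%^&*()_+=-1234567890;: ')
--
--
-- def is_werewolf(target: str) -> bool: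
--     s = [c.upper() for c in target if c not in STRIP]
--     i, j = 0, len(s) - 1
--     while i < j:
--         if s[i] != s[j]:
--             return False
--         i += 1
--         j -= 1
--     return True
-- ===== Notes on version B (the rewrite author's own statement) =====
-- stated objective: alternative
-- what changed: Replaces building a reversed copy character-by-character and comparing whole lists with a two-pointer in-place palindrome scan over a single filtered uppercase list, short-circuiting on the first mismatch.
import Mathlib
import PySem

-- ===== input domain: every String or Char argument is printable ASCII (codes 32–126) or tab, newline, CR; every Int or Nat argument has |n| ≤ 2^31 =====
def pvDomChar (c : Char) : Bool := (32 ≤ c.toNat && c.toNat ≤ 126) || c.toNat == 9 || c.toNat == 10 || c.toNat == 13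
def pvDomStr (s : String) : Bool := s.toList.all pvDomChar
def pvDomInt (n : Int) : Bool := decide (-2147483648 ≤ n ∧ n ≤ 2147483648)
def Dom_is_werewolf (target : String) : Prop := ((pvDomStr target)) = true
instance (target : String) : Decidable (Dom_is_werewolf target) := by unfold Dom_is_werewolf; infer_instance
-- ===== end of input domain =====

-- B replaces A's character-by-character reversed-copy construction and whole-list comparison
-- with a two-pointer palindrome scan over one filtered uppercase list (alternative decomposition).


-- ===== PORT A =====
def pvStripA : List Char := "123,.\"[]?()!<>~@#$%^&*()_+=-1234567890;: ".toList

def is_werewolf (target : String) : Bool :=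
  -- str.translate({ord(i): None for i in …}) deletes exactly the listed chars: ported by hand as a filter (exact)
  let t := PySem.Chars.lower (target.toList.filter (fun c => !(pvStripA.contains c)))
  let l_message := PySem.Chars.replace (PySem.Chars.upper t) [' '] []
  let result := (PySem.List.pyRange (l_message.length : Int) 0 (-1)).foldl
      (fun acc i => acc ++ [PySem.List.pyGetD l_message (i - 1) ' ']) ([] : List Char)
  let l_result := result
  l_result == l_message

-- ===== PORT B =====
def pvStripB : List Char := "123,.\"[]?()!<>~@#$%^&*()_+=-1234567890;: ".toList

-- while i < j: compare s[i], s[j] (both indices always in range there), move inward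
def pvPalScan (s : List Char) (i j : Nat) : Bool :=
  if i < j then
    if s.getD i ' ' ≠ s.getD j ' ' then false
    else pvPalScan s (i + 1) (j - 1)
  else true
termination_by j - i

def is_werewolf_alt (target : String) : Bool :=
  let s := (target.toList.filter (fun c => !(pvStripB.contains c))).map PySem.Chars.upperChar
  pvPalScan s 0 (s.length - 1)

-- ===== PRECONDITION & SPEC =====
def Spec_is_werewolf (target : String) (out : Bool) : Prop := out = is_werewolf_alt target
instance (target : String) (out : Bool) : Decidable (Spec_is_werewolf target out) := by unfold Spec_is_werewolf; infer_instance

-- ===== CLAIM (what is proved, stated in full; the proofs are below) =====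
def Claim_equal_is_werewolf : Prop := ∀ (target : String), Dom_is_werewolf target → Spec_is_werewolf target (is_werewolf target)

-- ===== LEMMAS AND PROOFS =====

theorem pv_toNat_ofNat_small (n : Nat) (h : n < 55296) : (Char.ofNat n).toNat = n := by
  have hv : n.isValidChar := Or.inl h
  simp [Char.ofNat, hv, Char.toNat, Char.ofNatAux]

theorem pv_char_le_nat (a c : Char) : (a ≤ c) ↔ a.toNat ≤ c.toNat := by
  rw [Char.le_def, UInt32.le_iff_toNat_le]; rfl

theorem pv_isupper_iff (c : Char) : PySem.Chars.isupper c = true ↔ 65 ≤ c.toNat ∧ c.toNat ≤ 90 := by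
  simp [PySem.Chars.isupper, pv_char_le_nat]

theorem pv_islower_iff (c : Char) : PySem.Chars.islower c = true ↔ 97 ≤ c.toNat ∧ c.toNat ≤ 122 := by
  simp [PySem.Chars.islower, pv_char_le_nat]

theorem pv_upperChar_lowerChar (c : Char) :
    PySem.Chars.upperChar (PySem.Chars.lowerChar c) = PySem.Chars.upperChar c := by
  unfold PySem.Chars.lowerChar
  by_cases hu : 65 ≤ c.toNat ∧ c.toNat ≤ 90
  · rw [if_pos ((pv_isupper_iff c).mpr hu)]
    have hval : (Char.ofNat (c.toNat + 32)).toNat = c.toNat + 32 :=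
      pv_toNat_ofNat_small _ (by omega)
    unfold PySem.Chars.upperChar
    rw [if_pos ((pv_islower_iff _).mpr (by rw [hval]; omega)),
        if_neg (fun h => by rw [pv_islower_iff] at h; omega), hval]
    have : c.toNat + 32 - 32 = c.toNat := by omega
    rw [this, Char.ofNat_toNat]
  · rw [if_neg (fun h => hu ((pv_isupper_iff c).mp h))]

theorem pv_upperChar_space (c : Char) (h : PySem.Chars.upperChar c = ' ') : c = ' ' := by
  unfold PySem.Chars.upperChar at h
  by_cases hl : PySem.Chars.islower c = true
  · rw [if_pos hl] at h
    rw [pv_islower_iff] at hl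
    have := congrArg Char.toNat h
    rw [pv_toNat_ofNat_small _ (by omega)] at this
    have h32 : (' ').toNat = 32 := rfl
    rw [h32] at this
    omega
  · rwa [if_neg hl] at h

theorem pv_go_no_space (fuel : Nat) (l acc : List Char) (h : ' ' ∉ l) (hf : l.length ≤ fuel) :
    PySem.Chars.replace.go [' '] [] fuel l acc = acc.reverse ++ l := by
  induction fuel generalizing l acc with
  | zero => rw [PySem.Chars.replace.go]
  | succ n ih =>
    cases l with
    | nil => rw [PySem.Chars.replace.go]; simp; omega
    | cons c t =>
      rw [PySem.Chars.replace.go]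
      have hc : c ≠ ' ' := fun e => h (by simp [e])
      have hp : [' '].isPrefixOf (c :: t) = false := by
        simp [List.isPrefixOf]; exact fun e => hc e.symm
      rw [hp]
      simp only [Bool.false_eq_true, if_false]
      rw [ih t (c :: acc) (fun m => h (List.mem_cons_of_mem _ m)) (by simp at hf ⊢; omega)]
      simp

theorem pv_replace_space_noop (l : List Char) (h : ' ' ∉ l) :
    PySem.Chars.replace l [' '] [] = l := by
  rw [PySem.Chars.replace]
  simp only [List.isEmpty_cons, Bool.false_eq_true, if_false]
  simpa using pv_go_no_space l.length l [] h le_rfl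

theorem pv_fold_reverse (l : List Char) (k : Nat) (hk : k ≤ l.length) (acc : List Char) :
    (PySem.List.pyRange (k : Int) 0 (-1)).foldl
      (fun acc i => acc ++ [PySem.List.pyGetD l (i - 1) ' ']) acc = acc ++ (l.take k).reverse := by
  induction k generalizing acc with
  | zero => rw [PySem.List.pyRange_neg_one_eq_nil (by omega)]; simp
  | succ m ih =>
    rw [PySem.List.pyRange_neg_one_cons (by omega : (0:Int) < ((m+1 : Nat) : Int))]
    simp only [List.foldl_cons]
    rw [(by push_cast; ring : ((m+1 : Nat) : Int) - 1 = ((m : Nat) : Int)), PySem.List.pyGetD_natCast]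
    rw [ih (by omega)]
    have hm : m < l.length := by omega
    have ht : l.take (m+1) = l.take m ++ [l[m]] := by
      rw [List.take_add_one, List.getElem?_eq_getElem hm]; rfl
    rw [ht, List.reverse_append]
    simp [List.getD, List.getElem?_eq_getElem hm]

theorem pv_scan_iff (l : List Char) (i j : Nat) :
    pvPalScan l i j = true ↔ ∀ k, i ≤ k → k ≤ j → l.getD k ' ' = l.getD (i + j - k) ' ' := by
  fun_induction pvPalScan l i j with
  | case1 i j hij hne =>
    simp only [Bool.false_eq_true, false_iff]
    push Not
    exact ⟨i, le_rfl, le_of_lt hij, by simpa [Nat.add_sub_cancel_left] using hne⟩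
  | case2 i j hij hne ih =>
    rw [ih]
    have heq : l.getD i ' ' = l.getD j ' ' := by simpa using hne
    constructor
    · intro h k hik hkj
      rcases eq_or_lt_of_le hik with rfl | hik'
      · simpa [Nat.add_sub_cancel_left] using heq
      · rcases eq_or_lt_of_le hkj with rfl | hkj'
        · simpa [Nat.add_sub_cancel] using heq.symm
        · have := h k (by omega) (by omega)
          have harith : i + 1 + (j - 1) - k = i + j - k := by omega
          rwa [harith] at this
    · intro h k hik hkj
      have := h k (by omega) (by omega)
      have harith : i + 1 + (j - 1) - k = i + j - k := by omega
      rwa [← harith] at this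
  | case3 i j hij =>
    simp only [true_iff]
    intro k hik hkj
    obtain ⟨rfl, h2⟩ : k = i ∧ i = j := by omega
    congr 1
    omega

theorem pv_scan_eq_reverse (l : List Char) :
    (l.reverse == l) = pvPalScan l 0 (l.length - 1) := by
  have hiff : l.reverse = l ↔ (pvPalScan l 0 (l.length - 1) = true) := by
    rw [pv_scan_iff]
    constructor
    · intro he k _ hk
      rcases Nat.eq_zero_or_pos l.length with h0 | hpos
      · have : l = [] := List.eq_nil_of_length_eq_zero h0
        subst this; rfl
      · have hk' : k < l.length := by omega
        have e1 : l.reverse[k]? = l[k]? := by rw [he]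
        rw [List.getElem?_reverse (by omega)] at e1
        rw [List.getElem?_eq_getElem hk', List.getElem?_eq_getElem (by omega : l.length - 1 - k < l.length)] at e1
        rw [List.getD_eq_getElem l ' ' hk', List.getD_eq_getElem l ' ' (by omega : 0 + (l.length - 1) - k < l.length)]
        have e2 : l[l.length - 1 - k] = l[k] := Option.some.inj e1
        rw [← e2]
        congr 1
        omega
    · intro h
      apply List.ext_getElem (by simp)
      intro i h1 h2
      rw [List.getElem_reverse]
      have h1' : i < l.length := by simpa using h1
      have := h (l.length - 1 - i) (by omega) (by omega)
      rw [List.getD_eq_getElem l ' ' (by omega : l.length - 1 - i < l.length),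
          List.getD_eq_getElem l ' ' (by omega : 0 + (l.length - 1) - (l.length - 1 - i) < l.length)] at this
      rw [this]
      congr 1
      omega
  by_cases hp : l.reverse = l
  · rw [hiff.mp hp]; simp [hp]
  · have hfalse : pvPalScan l 0 (l.length - 1) = false := by
      cases h : pvPalScan l 0 (l.length - 1)
      · rfl
      · exact absurd (hiff.mpr h) hp
    rw [hfalse]
    simp [hp]

theorem pv_message_eq (F : List Char) (hs : ' ' ∉ F) :
    PySem.Chars.replace (PySem.Chars.upper (PySem.Chars.lower F)) [' '] []
      = F.map PySem.Chars.upperChar := by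
  have hmap : PySem.Chars.upper (PySem.Chars.lower F) = F.map PySem.Chars.upperChar := by
    simp [PySem.Chars.upper, PySem.Chars.lower, List.map_map, Function.comp_def, pv_upperChar_lowerChar]
  rw [hmap]
  apply pv_replace_space_noop
  intro hm
  obtain ⟨c, hc, he⟩ := List.mem_map.mp hm
  exact hs (by rwa [pv_upperChar_space c he] at hc)

-- ===== VERDICT (by name: the statement is the Claim_ definition above) =====
theorem is_werewolf_spec : Claim_equal_is_werewolf := by
  intro target _
  unfold Spec_is_werewolf is_werewolf is_werewolf_alt
  simp only [pvStripA, pvStripB]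
  have hspace : ' ' ∉ target.toList.filter (fun c => !(("123,.\"[]?()!<>~@#$%^&*()_+=-1234567890;: ".toList).contains c)) := by
    intro hm
    have := (List.mem_filter.mp hm).2
    simp at this
  rw [pv_message_eq _ hspace]
  rw [pv_fold_reverse _ _ le_rfl []]
  simp only [List.take_length, List.nil_append]
  exact pv_scan_eq_reverse _
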